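-- pv_equiv track=rewrite | github.com/ablab/HORmon | HORmon/HORmon_pipeline/DetectHOR.py | filterCycles
-- ===== SOURCE A (Python) =====
-- def getCycleCnt(cl, mncen):
--     clcnt = 0
--     for i in range(len(mncen) - len(cl)):
--         if mncen[i:i+len(cl)] == cl:
--             clcnt += 1
--
--     ccl = [x + "'" for x in cl[len(cl)::-1]]
--
--     for i in range(len(mncen) - len(cl)):
--         if mncen[i:i+len(cl)] == ccl:
--             clcnt += 1
--
--     return clcnt
--
-- def filterCycles(cycles, hybridSet, mncen, minTrav):
--     usedV = set()
--     cycles.sort(key=lambda x: -len(x))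
--     res_cyc = []
--     for cl in cycles:
--         if len([v for v in cl if v in hybridSet]) > 0:
--             continue
--
--         if getCycleCnt(cl, mncen) < minTrav:
--             continue
--
--         for v in cl:
--             if v not in usedV:
--                 res_cyc.append(cl)
--                 break
--         usedV |= set(cl)
--     return res_cyc
-- ===== SOURCE B (Python) =====
-- def filterCycles(cycles, hybridSet, mncen, minTrav):
--     # Count each distinct cycle length's windows of mncen once in a hash counter,
--     # so the per-cycle rescans of mncen disappear.
--     hyb = set(hybridSet)
--     n = len(mncen)
--     counters = {}
--     for cl in cycles:
--         m = len(cl)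
--         if m not in counters:
--             c = {}
--             for i in range(n - m):
--                 w = tuple(mncen[i:i + m])
--                 c[w] = c.get(w, 0) + 1
--             counters[m] = c
--     used = set()
--     res = []
--     for cl in sorted(cycles, key=lambda x: -len(x)):
--         if any(v in hyb for v in cl):
--             continue
--         c = counters[len(cl)]
--         ccl = tuple(x + "'" for x in reversed(cl))
--         if c.get(tuple(cl), 0) + c.get(ccl, 0) < minTrav:
--             continue
--         if not used.issuperset(cl):
--             res.append(cl)
--         used |= set(cl)
--     return res
-- ===== Notes on version B (the rewrite author's own statement) =====
-- stated objective: alternative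
-- what changed: Instead of rescanning mncen with two window-comparison loops per cycle, B builds one hash counter of all length-m windows of mncen per distinct cycle length and answers each cycle's occurrence count (cycle and its reversed-primed conjugate) by two dictionary lookups; the used/hybrid checks become set operations. It trades per-cycle rescans for a per-distinct-length indexing pass, which pays off only when many cycles share a length.
import Mathlib
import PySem

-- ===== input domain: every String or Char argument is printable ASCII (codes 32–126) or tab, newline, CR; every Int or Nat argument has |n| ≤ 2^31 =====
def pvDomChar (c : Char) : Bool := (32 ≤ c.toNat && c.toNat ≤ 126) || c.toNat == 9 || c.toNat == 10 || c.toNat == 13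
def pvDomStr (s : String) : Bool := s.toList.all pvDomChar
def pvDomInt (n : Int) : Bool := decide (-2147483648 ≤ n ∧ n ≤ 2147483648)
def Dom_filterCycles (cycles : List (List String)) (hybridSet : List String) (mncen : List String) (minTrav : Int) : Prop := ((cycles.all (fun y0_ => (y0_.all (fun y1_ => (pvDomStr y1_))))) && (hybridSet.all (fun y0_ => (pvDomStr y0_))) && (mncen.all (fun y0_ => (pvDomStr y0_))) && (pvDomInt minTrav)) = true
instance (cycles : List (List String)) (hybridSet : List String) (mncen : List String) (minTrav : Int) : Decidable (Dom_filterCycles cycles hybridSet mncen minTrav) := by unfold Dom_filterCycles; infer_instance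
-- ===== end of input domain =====

-- B replaces A's per-cycle rescans of mncen by one hash counter of windows per distinct
-- cycle length, looked up per cycle (objective: alternative algorithm; it pays only when
-- many cycles share a length).  Note: Python A sorts `cycles` in place (B does not mutate
-- it); the equivalence proved here is about the RETURN value only.

-- ===== PORT A =====
def getCycleCnt (cl : List String) (mncen : List String) : Int :=
  -- first loop: count windows equal to cl
  let clcnt : Int :=
    (PySem.List.pyRange 0 ((mncen.length : Int) - (cl.length : Int)) 1).foldl
      (fun clcnt i =>
        if PySem.List.slice mncen (some i) (some (i + (cl.length : Int))) = cl then clcnt + 1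
        else clcnt) 0
  -- ccl = [x + "'" for x in cl[len(cl)::-1]]   (step -1 ≠ 0, so slice? is always `some`)
  let ccl : List String :=
    ((PySem.List.slice? cl (some (cl.length : Int)) none (-1)).getD []).map (fun x => x ++ "'")
  -- second loop: count windows equal to ccl
  (PySem.List.pyRange 0 ((mncen.length : Int) - (cl.length : Int)) 1).foldl
    (fun clcnt i =>
      if PySem.List.slice mncen (some i) (some (i + (cl.length : Int))) = ccl then clcnt + 1
      else clcnt) clcnt

-- inner 'for v in cl: if v not in usedV: append; break' — true iff the loop appends
def pvAnyNew (usedV : PySem.Set String) : List String → Bool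
  | [] => false
  | v :: rest => if PySem.Set.contains usedV v then pvAnyNew usedV rest else true

def filterCycles (cycles : List (List String)) (hybridSet : List String) (mncen : List String) (minTrav : Int) : List (List String) :=
  let sortedCycles := PySem.List.sorted cycles (fun x => -(x.length : Int))
  let st := sortedCycles.foldl
    (fun (st : List (List String) × PySem.Set String) cl =>
      if 0 < (cl.filter (fun v => hybridSet.contains v)).length then st
      else if getCycleCnt cl mncen < minTrav then st
      else
        let res_cyc := if pvAnyNew st.2 cl then st.1 ++ [cl] else st.1
        (res_cyc, PySem.Set.union st.2 (PySem.Set.ofList cl)))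
    ([], PySem.Set.empty)
  st.1

-- ===== PORT B =====
def filterCycles_alt (cycles : List (List String)) (hybridSet : List String) (mncen : List String) (minTrav : Int) : List (List String) :=
  let hyb := PySem.Set.ofList hybridSet
  let n : Int := mncen.length
  -- one window counter per distinct cycle length
  let counters : PySem.Dict Int (PySem.Dict (List String) Int) :=
    cycles.foldl
      (fun counters cl =>
        let m : Int := cl.length
        if counters.contains m then counters
        else
          let c := (PySem.List.pyRange 0 (n - m) 1).foldl
            (fun c i =>
              let w := PySem.List.slice mncen (some i) (some (i + m))
              c.insert w (c.getD w 0 + 1))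
            PySem.Dict.empty
          counters.insert m c)
      PySem.Dict.empty
  let st := (PySem.List.sorted cycles (fun x => -(x.length : Int))).foldl
    (fun (st : List (List String) × PySem.Set String) cl =>
      if cl.any (fun v => PySem.Set.contains hyb v) then st
      else
        -- counters[len(cl)]: the key is always present (built above from the same list)
        let c := counters.getD (cl.length : Int) PySem.Dict.empty
        let ccl := cl.reverse.map (fun x => x ++ "'")
        if c.getD cl 0 + c.getD ccl 0 < minTrav then st
        else
          let res := if PySem.Set.issuperset st.2 cl then st.1 else st.1 ++ [cl]
          (res, PySem.Set.union st.2 (PySem.Set.ofList cl)))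
    ([], PySem.Set.empty)
  st.1

-- ===== PRECONDITION & SPEC =====
def Spec_filterCycles (cycles : List (List String)) (hybridSet : List String) (mncen : List String) (minTrav : Int) (out : List (List String)) : Prop := out = filterCycles_alt cycles hybridSet mncen minTrav
instance (cycles : List (List String)) (hybridSet : List String) (mncen : List String) (minTrav : Int) (out : List (List String)) : Decidable (Spec_filterCycles cycles hybridSet mncen minTrav out) := by unfold Spec_filterCycles; infer_instance

-- ===== CLAIM (what is proved, stated in full; the proofs are below) =====
def Claim_equal_filterCycles : Prop := ∀ (cycles : List (List String)) (hybridSet : List String) (mncen : List String) (minTrav : Int), Dom_filterCycles cycles hybridSet mncen minTrav → Spec_filterCycles cycles hybridSet mncen minTrav (filterCycles cycles hybridSet mncen minTrav)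

-- ===== LEMMAS AND PROOFS =====

-- the window of mncen of length m starting at i, and the list of all windows A scans
def pvWindows (mncen : List String) (m : Int) : List (List String) :=
  (PySem.List.pyRange 0 ((mncen.length : Int) - m) 1).map
    (fun i => PySem.List.slice mncen (some i) (some (i + m)))

-- cl[len(cl)::-1] is the full reverse
theorem pv_slice_len_rev (xs : List String) :
    PySem.List.slice? xs (some (xs.length : Int)) none (-1) = some xs.reverse := by
  rw [show PySem.List.slice? xs (some (xs.length : Int)) none (-1)
        = PySem.List.slice? xs none none (-1) from by
    unfold PySem.List.slice?
    rw [show PySem.List.sliceIndices xs.length (some (xs.length : Int)) none (-1)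
          = PySem.List.sliceIndices xs.length none none (-1) from by
      simp [PySem.List.sliceIndices]]]
  exact PySem.List.slice?_none_none_neg_one xs

-- a brute-force counting loop is a List.count over the mapped windows
theorem pv_foldl_count (l : List Int) (f : Int → List String) (key : List String)
    (acc : Int) :
    l.foldl (fun c i => if f i = key then c + 1 else c) acc
      = acc + ((l.map f).count key : Int) := by
  induction l generalizing acc with
  | nil => simp
  | cons x t ih =>
      simp only [List.foldl_cons, List.map_cons, List.count_cons, ih]
      by_cases h : f x = key
      · rw [if_pos h]
        have hb : (f x == key) = true := beq_iff_eq.mpr h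
        rw [hb, if_pos rfl]
        push_cast; ring
      · rw [if_neg h]
        have hb : (f x == key) = false := beq_eq_false_iff_ne.mpr h
        simp [hb]

theorem pv_getCycleCnt_eq (cl mncen : List String) :
    getCycleCnt cl mncen
      = (PySem.Dict.counter (pvWindows mncen cl.length)).getD cl 0
        + (PySem.Dict.counter (pvWindows mncen cl.length)).getD
            (cl.reverse.map (fun x => x ++ "'")) 0 := by
  unfold getCycleCnt
  simp only [pv_slice_len_rev, Option.getD_some]
  rw [pv_foldl_count _ (fun i => PySem.List.slice mncen (some i) (some (i + (cl.length : Int))))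
        (cl.reverse.map (fun x => x ++ "'"))]
  rw [pv_foldl_count _ (fun i => PySem.List.slice mncen (some i) (some (i + (cl.length : Int)))) cl 0]
  rw [PySem.Dict.getD_counter, PySem.Dict.getD_counter]
  simp only [pvWindows]
  ring

-- B's inner builder loop is the counter of the windows list
theorem pv_builder_eq (mncen : List String) (m : Int) :
    (PySem.List.pyRange 0 ((mncen.length : Int) - m) 1).foldl
        (fun c i =>
          let w := PySem.List.slice mncen (some i) (some (i + m))
          c.insert w (c.getD w 0 + 1))
        PySem.Dict.empty
      = PySem.Dict.counter (pvWindows mncen m) := by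
  rw [pvWindows, ← PySem.Dict.foldl_insert_getD_add_one_eq_counter, List.foldl_map]

-- the counters dict maps every length occurring in `cycles` to its window counter
theorem pv_counters_getD (cycles : List (List String)) (mncen : List String)
    (d : PySem.Dict Int (PySem.Dict (List String) Int))
    (hd : ∀ k v, d.get? k = some v → v = PySem.Dict.counter (pvWindows mncen k))
    (cl : List String) (hcl : cl ∈ cycles ∨ d.contains ((cl.length : Int)) = true) :
    (cycles.foldl
      (fun counters cl' =>
        let m : Int := cl'.length
        if counters.contains m then counters
        else
          let c := (PySem.List.pyRange 0 ((mncen.length : Int) - m) 1).foldl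
            (fun c i =>
              let w := PySem.List.slice mncen (some i) (some (i + m))
              c.insert w (c.getD w 0 + 1))
            PySem.Dict.empty
          counters.insert m c) d).getD ((cl.length : Int)) PySem.Dict.empty
      = PySem.Dict.counter (pvWindows mncen cl.length) := by
  induction cycles generalizing d with
  | nil =>
      rcases hcl with h | h
      · cases h
      · simp only [List.foldl_nil]
        rw [PySem.Dict.contains_eq_isSome_get?] at h
        rcases ho : d.get? ((cl.length : Int)) with _ | v
        · rw [ho] at h; simp at h
        · rw [PySem.Dict.getD_eq_get?_getD, ho, Option.getD_some]
          exact hd _ _ ho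
  | cons x t ih =>
      simp only [List.foldl_cons]
      by_cases hx : d.contains ((x.length : Int)) = true
      · rw [if_pos hx]
        apply ih d hd
        rcases hcl with h | h
        · rcases List.mem_cons.mp h with h | h
          · right; rw [h]; exact hx
          · left; exact h
        · right; exact h
      · rw [if_neg hx]
        apply ih
        · intro k v hkv
          by_cases hk : k = ((x.length : Int))
          · subst hk
            rw [PySem.Dict.get?_insert_self] at hkv
            rw [show (PySem.List.pyRange 0 ((mncen.length : Int) - (x.length : Int)) 1).foldl
                  (fun c i =>
                    let w := PySem.List.slice mncen (some i) (some (i + (x.length : Int)))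
                    c.insert w (c.getD w 0 + 1))
                  PySem.Dict.empty = PySem.Dict.counter (pvWindows mncen (x.length : Int))
                from pv_builder_eq mncen (x.length : Int)] at hkv
            cases hkv; rfl
          · rw [PySem.Dict.get?_insert_of_ne _ _ hk] at hkv
            exact hd k v hkv
        · rcases hcl with h | h
          · rcases List.mem_cons.mp h with h | h
            · right; rw [h, PySem.Dict.contains_insert]; simp
            · left; exact h
          · right; rw [PySem.Dict.contains_insert]; simp [h]

-- the hybrid-filter test of A equals the `any` test of B
theorem pv_hybrid_eq (cl hybridSet : List String) :
    (0 < (cl.filter (fun v => hybridSet.contains v)).length)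
      ↔ (cl.any (fun v => PySem.Set.contains (PySem.Set.ofList hybridSet) v) = true) := by
  rw [List.length_pos_iff]
  constructor
  · intro h
    rcases List.exists_mem_of_ne_nil _ h with ⟨v, hv⟩
    rcases List.mem_filter.mp hv with ⟨hv1, hv2⟩
    refine List.any_eq_true.mpr ⟨v, hv1, ?_⟩
    have hmem : v ∈ hybridSet := by simpa using hv2
    exact (PySem.Set.contains_iff _ _).mpr ((PySem.Set.mem_ofList _ _).mpr hmem)
  · intro h
    rcases List.any_eq_true.mp h with ⟨v, hv1, hv2⟩
    have hmem : v ∈ hybridSet :=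
      (PySem.Set.mem_ofList _ _).mp ((PySem.Set.contains_iff _ _).mp hv2)
    intro hnil
    have hvin : v ∈ cl.filter (fun v => hybridSet.contains v) :=
      List.mem_filter.mpr ⟨hv1, by simpa using hmem⟩
    rw [hnil] at hvin
    cases hvin

-- the break-loop of A appends iff cl is not a subset of usedV
theorem pv_anyNew_eq (usedV : PySem.Set String) (cl : List String) :
    pvAnyNew usedV cl = !(PySem.Set.issuperset usedV cl) := by
  induction cl with
  | nil =>
      have h0 : PySem.Set.issuperset usedV ([] : List String) = true :=
        (PySem.Set.issuperset_iff _ _).mpr (by intro x hx; cases hx)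
      rw [show pvAnyNew usedV [] = false from rfl, h0]
      rfl
  | cons v t ih =>
      by_cases hv : PySem.Set.contains usedV v = true
      · have hvmem : v ∈ usedV := (PySem.Set.contains_iff _ _).mp hv
        have hsup : PySem.Set.issuperset usedV (v :: t)
            = PySem.Set.issuperset usedV t := by
          by_cases h : PySem.Set.issuperset usedV t = true
          · rw [h]
            refine (PySem.Set.issuperset_iff _ _).mpr ?_
            intro x hx
            rcases List.mem_cons.mp hx with h' | h'
            · rw [h']; exact hvmem
            · exact (PySem.Set.issuperset_iff _ _).mp h x h'
          · rw [Bool.eq_false_iff.mpr h, Bool.eq_false_iff]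
            intro hc
            exact h ((PySem.Set.issuperset_iff _ _).mpr
              (fun x hx => (PySem.Set.issuperset_iff _ _).mp hc x (List.mem_cons_of_mem v hx)))
        have h1 : pvAnyNew usedV (v :: t) = pvAnyNew usedV t := by
          rw [show pvAnyNew usedV (v :: t)
                = if usedV.contains v then pvAnyNew usedV t else true from rfl, if_pos hv]
        rw [h1, ih, hsup]
      · have hvmem : v ∉ usedV := fun h => hv ((PySem.Set.contains_iff _ _).mpr h)
        have hsup : PySem.Set.issuperset usedV (v :: t) = false := by
          rw [Bool.eq_false_iff]
          intro hc
          exact hvmem ((PySem.Set.issuperset_iff _ _).mp hc v List.mem_cons_self)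
        have h1 : pvAnyNew usedV (v :: t) = true := by
          rw [show pvAnyNew usedV (v :: t)
                = if usedV.contains v then pvAnyNew usedV t else true from rfl, if_neg hv]
        rw [h1, hsup]
        rfl

-- the two per-cycle step functions agree on every cycle of the (sorted) input list
theorem pv_step_eq (cycles : List (List String)) (hybridSet mncen : List String)
    (minTrav : Int) (cl : List String) (hcl : cl ∈ cycles)
    (st : List (List String) × PySem.Set String) :
    (if 0 < (cl.filter (fun v => hybridSet.contains v)).length then st
     else if getCycleCnt cl mncen < minTrav then st
     else
       let res_cyc := if pvAnyNew st.2 cl then st.1 ++ [cl] else st.1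
       (res_cyc, PySem.Set.union st.2 (PySem.Set.ofList cl)))
    = (if cl.any (fun v => PySem.Set.contains (PySem.Set.ofList hybridSet) v) then st
       else
         let c := (cycles.foldl
           (fun counters cl' =>
             let m : Int := cl'.length
             if counters.contains m then counters
             else
               let c := (PySem.List.pyRange 0 ((mncen.length : Int) - m) 1).foldl
                 (fun c i =>
                   let w := PySem.List.slice mncen (some i) (some (i + m))
                   c.insert w (c.getD w 0 + 1))
                 PySem.Dict.empty
               counters.insert m c)
           PySem.Dict.empty).getD ((cl.length : Int)) PySem.Dict.empty
         let ccl := cl.reverse.map (fun x => x ++ "'")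
         if c.getD cl 0 + c.getD ccl 0 < minTrav then st
         else
           let res := if PySem.Set.issuperset st.2 cl then st.1 else st.1 ++ [cl]
           (res, PySem.Set.union st.2 (PySem.Set.ofList cl))) := by
  have hc : (cycles.foldl
      (fun counters cl' =>
        let m : Int := cl'.length
        if counters.contains m then counters
        else
          let c := (PySem.List.pyRange 0 ((mncen.length : Int) - m) 1).foldl
            (fun c i =>
              let w := PySem.List.slice mncen (some i) (some (i + m))
              c.insert w (c.getD w 0 + 1))
            PySem.Dict.empty
          counters.insert m c)
      PySem.Dict.empty).getD ((cl.length : Int)) PySem.Dict.empty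
      = PySem.Dict.counter (pvWindows mncen cl.length) := by
    apply pv_counters_getD cycles mncen PySem.Dict.empty
    · intro k v hkv; rw [PySem.Dict.get?_empty] at hkv; cases hkv
    · left; exact hcl
  have hcount := pv_getCycleCnt_eq cl mncen
  by_cases hh : cl.any (fun v => PySem.Set.contains (PySem.Set.ofList hybridSet) v) = true
  · rw [if_pos ((pv_hybrid_eq cl hybridSet).mpr hh), if_pos hh]
  · rw [if_neg (fun h => hh ((pv_hybrid_eq cl hybridSet).mp h)), if_neg hh]
    simp only [hc, ← hcount]
    by_cases hm : getCycleCnt cl mncen < minTrav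
    · rw [if_pos hm, if_pos hm]
    · rw [if_neg hm, if_neg hm]
      simp only [pv_anyNew_eq]
      by_cases hs : PySem.Set.issuperset st.2 cl = true
      · simp [hs]
      · simp [Bool.eq_false_iff.mpr hs]

-- ===== VERDICT (by name: the statement is the Claim_ definition above) =====
theorem filterCycles_spec : Claim_equal_filterCycles := by
  intro cycles hybridSet mncen minTrav _
  unfold Spec_filterCycles filterCycles filterCycles_alt
  dsimp only
  refine congrArg Prod.fst ?_
  apply PySem.List.foldl_congr_mem
  intro st cl hcl
  exact pv_step_eq cycles hybridSet mncen minTrav cl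
    ((PySem.List.mem_sorted _ _ _ _).mp hcl) st
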